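-- pv_equiv track=rewrite | github.com/sweeden-ttu/NIST_AI_Trustworthy_Eval | scripts/toy_aes128_trace.py | mix_single_column
-- ===== SOURCE A (Python) =====
-- def xtime(a: int) -> int:
--     return (((a << 1) ^ 0x1B) & 0xFF) if (a & 0x80) else ((a << 1) & 0xFF)
--
-- def mix_single_column(col: list[int], matrix: list[list[int]] | None = None) -> list[int]:
--     """Mix one 4-byte column. Default = AES MixColumns matrix."""
--     if matrix is None:
--         matrix = [[2, 3, 1, 1], [1, 2, 3, 1], [1, 1, 2, 3], [3, 1, 1, 2]]
--     out = [0, 0, 0, 0]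
--     for i in range(4):
--         v = 0
--         for j in range(4):
--             c = matrix[i][j]
--             t = col[j]
--             if c == 1:
--                 v ^= t
--             elif c == 2:
--                 v ^= xtime(t)
--             elif c == 3:
--                 v ^= xtime(t) ^ t
--             else:
--                 acc = 0
--                 bb = t
--                 for k in range(8):
--                     if c & 1:
--                         acc ^= bb
--                     bb = xtime(bb)
--                     c >>= 1
--                 v ^= acc & 0xFF
--         out[i] = v & 0xFF
--     return out
-- ===== SOURCE B (Python) =====
-- def xtime(a: int) -> int:
--     return (((a << 1) ^ 0x1B) & 0xFF) if (a & 0x80) else ((a << 1) & 0xFF)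
--
-- def _build_tables():
--     exp = [0] * 255
--     log = [0] * 256
--     x = 1
--     for i in range(255):
--         exp[i] = x
--         log[x] = i
--         x ^= xtime(x)  # multiply x by 0x03, the generator
--     return exp, log
--
-- _EXP, _LOG = _build_tables()
--
-- _AES_MATRIX = [[2, 3, 1, 1], [1, 2, 3, 1], [1, 1, 2, 3], [3, 1, 1, 2]]
--
-- def gf_mul(a: int, b: int) -> int:
--     a &= 0xFF
--     b &= 0xFF
--     if a == 0 or b == 0:
--         return 0
--     return _EXP[(_LOG[a] + _LOG[b]) % 255]
--
-- def mix_single_column(col: list[int], matrix: list[list[int]] | None = None) -> list[int]: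
--     """Mix one 4-byte column. Default = AES MixColumns matrix."""
--     if matrix is None:
--         matrix = _AES_MATRIX
--     return [gf_mul(matrix[i][0], col[0]) ^ gf_mul(matrix[i][1], col[1])
--             ^ gf_mul(matrix[i][2], col[2]) ^ gf_mul(matrix[i][3], col[3])
--             for i in range(4)]
-- ===== Notes on version B (the rewrite author's own statement) =====
-- stated objective: idiomatic
-- what changed: Replaces A's per-coefficient dispatch (1/2/3/bit-by-bit shift-and-xor multiply) with the standard table-driven GF(2^8) arithmetic: precomputed log/antilog tables for generator 0x03, gf_mul as one antilog lookup of the sum of logs mod 255, and a comprehension over the four output bytes.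
import Mathlib
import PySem

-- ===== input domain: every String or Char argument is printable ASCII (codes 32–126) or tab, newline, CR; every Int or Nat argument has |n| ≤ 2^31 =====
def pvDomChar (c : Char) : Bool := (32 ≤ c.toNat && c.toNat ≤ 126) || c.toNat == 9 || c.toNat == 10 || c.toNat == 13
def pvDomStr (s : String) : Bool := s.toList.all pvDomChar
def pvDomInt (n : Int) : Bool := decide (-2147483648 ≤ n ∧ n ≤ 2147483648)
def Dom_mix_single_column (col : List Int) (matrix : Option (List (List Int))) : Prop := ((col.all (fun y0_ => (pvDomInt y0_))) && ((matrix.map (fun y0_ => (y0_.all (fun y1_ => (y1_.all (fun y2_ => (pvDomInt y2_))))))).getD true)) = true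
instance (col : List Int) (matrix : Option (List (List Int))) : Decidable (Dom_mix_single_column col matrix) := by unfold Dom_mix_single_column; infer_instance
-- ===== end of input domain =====

-- ===== PORT A =====
-- B replaces A's per-coefficient dispatch and bit-by-bit GF(2^8) multiply with log/antilog tables (objective: idiomatic table-driven implementation).
def xtime (a : Int) : Int :=
  if PySem.Int.band a 128 ≠ 0 then PySem.Int.band (PySem.Int.bxor (a <<< (1:Nat)) 27) 255
  else PySem.Int.band (a <<< (1:Nat)) 255

-- inner 8-round bit loop of A's generic multiply (state = (acc, bb, c))
def aBitStep (s : Int × Int × Int) (_ : Int) : Int × Int × Int :=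
  (if PySem.Int.band s.2.2 1 ≠ 0 then PySem.Int.bxor s.1 s.2.1 else s.1,
   xtime s.2.1, s.2.2 >>> (1:Nat))

def mix_single_column (col : List Int) (matrix : Option (List (List Int))) : List Int :=
  let m := match matrix with
    | none => [[2, 3, 1, 1], [1, 2, 3, 1], [1, 1, 2, 3], [3, 1, 1, 2]]
    | some m0 => m0
  (PySem.List.pyRange 0 4 1).foldl (fun out i =>
    let v := (PySem.List.pyRange 0 4 1).foldl (fun v j =>
      let c := PySem.List.pyGetD (PySem.List.pyGetD m i []) j 0
      let t := PySem.List.pyGetD col j 0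
      if c = 1 then PySem.Int.bxor v t
      else if c = 2 then PySem.Int.bxor v (xtime t)
      else if c = 3 then PySem.Int.bxor v (PySem.Int.bxor (xtime t) t)
      else
        let s := (PySem.List.pyRange 0 8 1).foldl aBitStep (0, t, c)
        PySem.Int.bxor v (PySem.Int.band s.1 255)) 0
    PySem.List.pySetD out i (PySem.Int.band v 255)) [0, 0, 0, 0]

-- ===== PORT B =====
-- _build_tables(): exp/log tables for GF(2^8) with generator 3
def gfTables : List Int × List Int :=
  let s := (PySem.List.pyRange 0 255 1).foldl
    (fun (s : List Int × List Int × Int) i =>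
      (PySem.List.pySetD s.1 i s.2.2, PySem.List.pySetD s.2.1 s.2.2 i,
       PySem.Int.bxor s.2.2 (xtime s.2.2)))
    (List.replicate 255 0, List.replicate 256 0, 1)
  (s.1, s.2.1)

def gf_mul (a b : Int) : Int :=
  let a := PySem.Int.band a 255
  let b := PySem.Int.band b 255
  if a = 0 ∨ b = 0 then 0
  else PySem.List.pyGetD gfTables.1
        (PySem.Int.mod (PySem.List.pyGetD gfTables.2 a 0 + PySem.List.pyGetD gfTables.2 b 0) 255) 0

def mix_single_column_alt (col : List Int) (matrix : Option (List (List Int))) : List Int :=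
  let m := match matrix with
    | none => [[2, 3, 1, 1], [1, 2, 3, 1], [1, 1, 2, 3], [3, 1, 1, 2]]
    | some m0 => m0
  (PySem.List.pyRange 0 4 1).map (fun i =>
    PySem.Int.bxor (PySem.Int.bxor (PySem.Int.bxor
      (gf_mul (PySem.List.pyGetD (PySem.List.pyGetD m i []) 0 0) (PySem.List.pyGetD col 0 0))
      (gf_mul (PySem.List.pyGetD (PySem.List.pyGetD m i []) 1 0) (PySem.List.pyGetD col 1 0)))
      (gf_mul (PySem.List.pyGetD (PySem.List.pyGetD m i []) 2 0) (PySem.List.pyGetD col 2 0)))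
      (gf_mul (PySem.List.pyGetD (PySem.List.pyGetD m i []) 3 0) (PySem.List.pyGetD col 3 0)))

-- ===== PRECONDITION & SPEC =====
-- Pre_ excludes exactly the inputs on which A raises IndexError: col shorter than 4,
-- or an explicit matrix with fewer than 4 rows or a row among the first 4 shorter than 4.
def Pre_mix_single_column (col : List Int) (matrix : Option (List (List Int))) : Prop :=
  4 ≤ col.length ∧ ∀ m ∈ matrix, 4 ≤ m.length ∧ ∀ row ∈ m.take 4, 4 ≤ row.length
instance (col : List Int) (matrix : Option (List (List Int))) : Decidable (Pre_mix_single_column col matrix) := by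
  unfold Pre_mix_single_column; infer_instance

def pvWitness_mix_single_column : List Int × Option (List (List Int)) := ([1, 2, 3, 4], none)

def Spec_mix_single_column (col : List Int) (matrix : Option (List (List Int))) (out : List Int) : Prop := out = mix_single_column_alt col matrix
instance (col : List Int) (matrix : Option (List (List Int))) (out : List Int) : Decidable (Spec_mix_single_column col matrix out) := by unfold Spec_mix_single_column; infer_instance

-- ===== CLAIM (what is proved, stated in full; the proofs are below) =====
def Claim_equal_mix_single_column : Prop := ∀ (col : List Int) (matrix : Option (List (List Int))), Dom_mix_single_column col matrix → Pre_mix_single_column col matrix → Spec_mix_single_column col matrix (mix_single_column col matrix)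

-- ===== LEMMAS AND PROOFS =====

-- literal values of B's tables, and the same packed into one Nat (byte i = entry i)
def expLit : List Int := [1, 3, 5, 15, 17, 51, 85, 255, 26, 46, 114, 150, 161, 248, 19, 53, 95, 225, 56, 72, 216, 115, 149, 164, 247, 2, 6, 10, 30, 34, 102, 170, 229, 52, 92, 228, 55, 89, 235, 38, 106, 190, 217, 112, 144, 171, 230, 49, 83, 245, 4, 12, 20, 60, 68, 204, 79, 209, 104, 184, 211, 110, 178, 205, 76, 212, 103, 169, 224, 59, 77, 215, 98, 166, 241, 8, 24, 40, 120, 136, 131, 158, 185, 208, 107, 189, 220, 127, 129, 152, 179, 206, 73, 219, 118, 154, 181, 196, 87, 249, 16, 48, 80, 240, 11, 29, 39, 105, 187, 214, 97, 163, 254, 25, 43, 125, 135, 146, 173, 236, 47, 113, 147, 174, 233, 32, 96, 160, 251, 22, 58, 78, 210, 109, 183, 194, 93, 231, 50, 86, 250, 21, 63, 65, 195, 94, 226, 61, 71, 201, 64, 192, 91, 237, 44, 116, 156, 191, 218, 117, 159, 186, 213, 100, 172, 239, 42, 126, 130, 157, 188, 223, 122, 142, 137, 128, 155, 182, 193, 88,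 232, 35, 101, 175, 234, 37, 111, 177, 200, 67, 197, 84, 252, 31, 33, 99, 165, 244, 7, 9, 27, 45, 119, 153, 176, 203, 70, 202, 69, 207, 74, 222, 121, 139, 134, 145, 168, 227, 62, 66, 198, 81, 243, 14, 18, 54, 90, 238, 41, 123, 141, 140, 143, 138, 133, 148, 167, 242, 13, 23, 57, 75, 221, 124, 132, 151, 162, 253, 28, 36, 108, 180, 199, 82, 246]
def logLit : List Int := [0, 0, 25, 1, 50, 2, 26, 198, 75, 199, 27, 104, 51, 238, 223, 3, 100, 4, 224, 14, 52, 141, 129, 239, 76, 113, 8, 200, 248, 105, 28, 193, 125, 194, 29, 181, 249, 185, 39, 106, 77, 228, 166, 114, 154, 201, 9, 120, 101, 47, 138, 5, 33, 15, 225, 36, 18, 240, 130, 69, 53, 147, 218, 142, 150, 143, 219, 189, 54, 208, 206, 148, 19, 92, 210, 241, 64, 70, 131, 56, 102, 221, 253, 48, 191, 6, 139, 98, 179, 37, 226, 152, 34, 136, 145, 16, 126, 110, 72, 195, 163, 182, 30, 66, 58, 107, 40, 84, 250, 133, 61, 186, 43, 121, 10, 21, 155, 159, 94, 202, 78, 212,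 172, 229, 243, 115, 167, 87, 175, 88, 168, 80, 244, 234, 214, 116, 79, 174, 233, 213, 231, 230, 173, 232, 44, 215, 117, 122, 235, 22, 11, 245, 89, 203, 95, 176, 156, 169, 81, 160, 127, 12, 246, 111, 23, 196, 73, 236, 216, 67, 31, 45, 164, 118, 123, 183, 204, 187, 62, 90, 251, 96, 177, 134, 59, 82, 161, 108, 170, 85, 41, 157, 151, 178, 135, 144, 97, 190, 220, 252, 188, 149, 207, 205, 55, 63, 91, 209, 83, 57, 132, 60, 65, 162, 109, 71, 20, 42, 158, 93, 86, 242, 211, 171, 68, 17, 146, 217, 35, 32, 46, 137, 180, 124, 184, 38, 119, 153, 227, 165, 103, 74, 237, 222, 197, 49, 254, 24, 13, 99, 140, 128, 192, 247, 112, 7]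
def EXPP : Nat := 121466575815500734415996836054882879791832871126464106601702187317037704638720699736399773789881350966450612456712855012027411276600174289287471020404625812305602624065235109912861702064162581238381248958448422203687095403783548669481020115429473714815130546491650907227391014769411226625179674495964331439187933946584331397333639979447433688574122779091165484305754955373075414835846686739481168846087332879005575464100018941681806164995707250399423063311368515928344698269234575261926727907427524598329539937222090466892085999338983806607642276495436692919915470849325341672618663070658392065151738926641076044545
def LOGP : Nat := 939374623831894136699086600277250597547650664638770418422125146541797353646788332867483593573384618611044815625336497665827114626705134492515730415652478061620339993830966980270842846318821775850471098591710629241171812800746666233448222972174585295916389942636813666312872914849454985560152530477328703759683306625234997237483834721220409437442253146756845415190424543171129629468776480674528486868811725071010351012234056630775688111116293610821126543142160426617079940511630006820862697466582575257349116925728488930366609138264019883664906661504235885380294353134295748489096855100647154935187045898006656778240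

def logAt (n : Nat) : Nat := LOGP >>> (8 * n) &&& 255
def expAt (n : Nat) : Nat := EXPP >>> (8 * n) &&& 255

-- byte-level (Nat) mirrors of A's bit loop and of B's table multiply
def xtNN (b : Nat) : Nat := if 128 ≤ b then 2 * b % 256 ^^^ 27 else 2 * b

def loopNN : Nat → Nat → Nat → Nat → Nat
  | 0, a, _, _ => a
  | n+1, a, b, c => loopNN n (if c % 2 = 1 then a ^^^ b else a) (xtNN b) (c / 2)

def gfFastN (c t : Nat) : Nat :=
  if c = 0 ∨ t = 0 then 0 else expAt ((logAt c + logAt t) % 255)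

-- if-free forms used to make the 65536-case kernel check cheap
def xtF (b : Nat) : Nat := (2 * b ^^^ 27 * (b / 128)) % 256

def zmask (n : Nat) : Nat := 1 - (1 - n)

def gfF2 (c t : Nat) : Nat := expAt ((logAt c + logAt t) % 255) * zmask c * zmask t

def loop8F (t c : Nat) : Nat :=
  let a1 := 0 ^^^ t * (c % 2);   let b1 := xtF t;   let c1 := c / 2
  let a2 := a1 ^^^ b1 * (c1 % 2); let b2 := xtF b1; let c2 := c1 / 2
  let a3 := a2 ^^^ b2 * (c2 % 2); let b3 := xtF b2; let c3 := c2 / 2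
  let a4 := a3 ^^^ b3 * (c3 % 2); let b4 := xtF b3; let c4 := c3 / 2
  let a5 := a4 ^^^ b4 * (c4 % 2); let b5 := xtF b4; let c5 := c4 / 2
  let a6 := a5 ^^^ b5 * (c5 % 2); let b6 := xtF b5; let c6 := c5 / 2
  let a7 := a6 ^^^ b6 * (c6 % 2); let b7 := xtF b6; let c7 := c6 / 2
  a7 ^^^ b7 * (c7 % 2)

-- byte-level (Int) versions, intermediate between the port and the Nat mirrors
def xtI (b : Int) : Int := if 128 ≤ b then PySem.Int.bxor (2 * b % 256) 27 else 2 * b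

def loopI : Nat → Int → Int → Int → Int
  | 0, a, _, _ => a
  | n+1, a, b, c => loopI n (if c % 2 = 1 then PySem.Int.bxor a b else a) (xtI b) (c / 2)

-- A's per-(i,j) contribution to the xor accumulator
def contrib (c t : Int) : Int :=
  if c = 1 then t
  else if c = 2 then xtime t
  else if c = 3 then PySem.Int.bxor (xtime t) t
  else PySem.Int.band ((PySem.List.pyRange 0 8 1).foldl aBitStep (0, t, c)).1 255

theorem andmask (a : Nat) : a &&& 255 = a % 256 := by
  have := Nat.and_two_pow_sub_one_eq_mod a 8
  norm_num at this; omega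
theorem nxor_mod (a b : Nat) : (a ^^^ b) % 256 = a % 256 ^^^ b % 256 := by
  rw [← andmask, ← andmask, ← andmask, Nat.and_xor_distrib_right]
theorem bit7 (a : Nat) : a &&& 128 = 128 * (a / 128 % 2) := by
  have h : a &&& 2^7 = (a.testBit 7).toNat * 2^7 := Nat.and_two_pow a 7
  rw [Nat.testBit_eq_decide_div_mod_eq] at h
  norm_num at h
  rcases Nat.mod_two_eq_zero_or_one (a / 128) with h2 | h2 <;> simp [h2] at h ⊢ <;> omega
theorem ncompl (m : Nat) (hm : m < 256) : 255 - m = 255 ^^^ m := by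
  revert m
  set_option maxRecDepth 4000 in decide

theorem M0 (x : Int) : PySem.Int.band x 255 = x % 256 := by
  cases x with
  | ofNat a =>
    have : PySem.Int.band (Int.ofNat a) 255 = ((a &&& 255 : Nat) : Int) :=
      PySem.Int.band_natCast a 255
    rw [this, andmask]
    simp only [Int.ofNat_eq_natCast]
    omega
  | negSucc a =>
    have hx : ¬ (0 ≤ Int.negSucc a) := by omega
    simp only [PySem.Int.band, hx, if_false]
    norm_num
    rw [show ((255:Int)).toNat = 255 from rfl, Nat.and_comm, andmask]
    omega

theorem B7 (x : Int) : (PySem.Int.band x 128 ≠ 0) ↔ 128 ≤ x % 256 := by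
  cases x with
  | ofNat a =>
    have : PySem.Int.band (Int.ofNat a) 128 = ((a &&& 128 : Nat) : Int) :=
      PySem.Int.band_natCast a 128
    rw [this, bit7]
    simp only [Int.ofNat_eq_natCast]
    omega
  | negSucc a =>
    have hx : ¬ (0 ≤ Int.negSucc a) := by omega
    simp only [PySem.Int.band, hx, if_false]
    norm_num
    rw [show ((128:Int)).toNat = 128 from rfl, Nat.and_comm, bit7]
    omega

theorem M1 (x y : Int) : PySem.Int.bxor x y % 256 = PySem.Int.bxor (x % 256) (y % 256) := by
  cases x with
  | ofNat a =>
    cases y with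
    | ofNat b =>
      rw [show Int.ofNat a = ((a:Nat):Int) from rfl, show Int.ofNat b = ((b:Nat):Int) from rfl,
          PySem.Int.bxor_natCast]
      have ha : ((a:Int)) % 256 = ((a % 256 : Nat) : Int) := by omega
      have hb : ((b:Int)) % 256 = ((b % 256 : Nat) : Int) := by omega
      rw [ha, hb, PySem.Int.bxor_natCast, ← nxor_mod]
      omega
    | negSucc b =>
      have hx : (0:Int) ≤ Int.ofNat a := Int.natCast_nonneg a
      have hy : ¬ (0 ≤ Int.negSucc b) := by exact not_le.mpr (Int.negSucc_lt_zero b)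
      have h2 : (-Int.negSucc b - 1).toNat = b := by omega
      have hL : PySem.Int.bxor (Int.ofNat a) (Int.negSucc b) = -((a ^^^ b : Nat) : Int) - 1 := by
        simp only [PySem.Int.bxor]
        rw [if_pos hx, if_neg hy, h2, show (Int.ofNat a).toNat = a from rfl]
      have ha : Int.ofNat a % 256 = ((a % 256 : Nat) : Int) := by rw [Int.ofNat_eq_natCast]; omega
      have hb : Int.negSucc b % 256 = ((255 - b % 256 : Nat) : Int) := by omega
      rw [hL, ha, hb, PySem.Int.bxor_natCast,
          show ((255:Nat) - b % 256) = (255 : Nat) ^^^ b % 256 from ncompl _ (by omega)]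
      have e1 : a % 256 ^^^ (255 ^^^ b % 256) = 255 ^^^ ((a ^^^ b) % 256) := by
        rw [nxor_mod]
        simp [Nat.xor_comm, Nat.xor_left_comm]
      rw [e1, ← ncompl ((a ^^^ b) % 256) (by omega)]
      omega
  | negSucc a =>
    cases y with
    | ofNat b =>
      have hx : ¬ (0 ≤ Int.negSucc a) := by exact not_le.mpr (Int.negSucc_lt_zero a)
      have hy : (0:Int) ≤ Int.ofNat b := Int.natCast_nonneg b
      have h2 : (-Int.negSucc a - 1).toNat = a := by omega
      have hL : PySem.Int.bxor (Int.negSucc a) (Int.ofNat b) = -((a ^^^ b : Nat) : Int) - 1 := by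
        simp only [PySem.Int.bxor]
        rw [if_neg hx, if_pos hy, h2, show (Int.ofNat b).toNat = b from rfl]
      have ha : Int.negSucc a % 256 = ((255 - a % 256 : Nat) : Int) := by omega
      have hb : Int.ofNat b % 256 = ((b % 256 : Nat) : Int) := by rw [Int.ofNat_eq_natCast]; omega
      rw [hL, ha, hb, PySem.Int.bxor_natCast,
          show ((255:Nat) - a % 256) = (255 : Nat) ^^^ a % 256 from ncompl _ (by omega)]
      have e1 : (255 ^^^ a % 256) ^^^ b % 256 = 255 ^^^ ((a ^^^ b) % 256) := by
        rw [nxor_mod, Nat.xor_assoc]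
      rw [e1, ← ncompl ((a ^^^ b) % 256) (by omega)]
      omega
    | negSucc b =>
      have hx : ¬ (0 ≤ Int.negSucc a) := by exact not_le.mpr (Int.negSucc_lt_zero a)
      have hy : ¬ (0 ≤ Int.negSucc b) := by exact not_le.mpr (Int.negSucc_lt_zero b)
      have h1 : (-Int.negSucc a - 1).toNat = a := by omega
      have h2 : (-Int.negSucc b - 1).toNat = b := by omega
      have hL : PySem.Int.bxor (Int.negSucc a) (Int.negSucc b) = ((a ^^^ b : Nat) : Int) := by
        simp only [PySem.Int.bxor]
        rw [if_neg hx, if_neg hy, h1, h2]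
      have ha : Int.negSucc a % 256 = ((255 - a % 256 : Nat) : Int) := by omega
      have hb : Int.negSucc b % 256 = ((255 - b % 256 : Nat) : Int) := by omega
      rw [hL, ha, hb, PySem.Int.bxor_natCast,
          show ((255:Nat) - a % 256) = (255 : Nat) ^^^ a % 256 from ncompl _ (by omega),
          show ((255:Nat) - b % 256) = (255 : Nat) ^^^ b % 256 from ncompl _ (by omega)]
      have e1 : (255 ^^^ a % 256) ^^^ (255 ^^^ b % 256) = (a ^^^ b) % 256 := by
        rw [nxor_mod]
        simp [Nat.xor_comm, Nat.xor_left_comm]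
      rw [e1]
      omega

theorem shiftl1 (a : Int) : a <<< (1:Nat) = 2 * a := by
  rw [Int.shiftLeft_eq]; ring
theorem shiftr1 (a : Int) : a >>> (1:Nat) = a / 2 := by
  rw [Int.shiftRight_eq_div_pow]; norm_num
theorem emod256_lt (x : Int) : 0 ≤ x % 256 ∧ x % 256 < 256 := by omega

theorem xtime_range (t : Int) : 0 ≤ xtime t ∧ xtime t < 256 := by
  unfold xtime
  split <;> rw [M0] <;> omega

theorem xtime_eq (t : Int) : xtime t = xtI (t % 256) := by
  unfold xtime xtI
  by_cases h : 128 ≤ t % 256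
  · rw [if_pos ((B7 t).mpr h), if_pos h, shiftl1, M0, M1]
    have h2 : 2 * t % 256 = 2 * (t % 256) % 256 := by omega
    have h3 : (27 : Int) % 256 = 27 := by norm_num
    rw [h2, h3]
  · rw [if_neg (fun hc => h ((B7 t).mp hc)), if_neg h, shiftl1, M0]
    omega

theorem xtI_cast (n : Nat) : xtI (n : Int) = ((xtNN n : Nat) : Int) := by
  unfold xtI xtNN
  by_cases h : 128 ≤ n
  · rw [if_pos (by exact_mod_cast h), if_pos h]
    have h2 : (2 * (n:Int) % 256) = ((2 * n % 256 : Nat) : Int) := by omega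
    rw [h2, show ((27:Int)) = ((27:Nat):Int) from rfl, PySem.Int.bxor_natCast]
  · rw [if_neg (by exact_mod_cast h), if_neg h]
    push_cast; ring

theorem halfmod (c m : Int) (hm : 0 < m) : c % (2 * m) / 2 = c / 2 % m := by
  have h := Int.ediv_add_emod c (2 * m)
  have hr0 : 0 ≤ c % (2 * m) := Int.emod_nonneg c (by omega)
  have hr1 : c % (2 * m) < 2 * m := Int.emod_lt_of_pos c (by omega)
  have h2 : c / 2 = c % (2 * m) / 2 + m * (c / (2 * m)) := by
    conv_lhs => rw [show c = c % (2 * m) + (m * (c / (2 * m))) * 2 by linarith [h]]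
    rw [Int.add_mul_ediv_right _ _ (by norm_num : (2:Int) ≠ 0)]
  rw [h2, Int.add_mul_emod_self_left]
  exact (Int.emod_eq_of_lt (by omega) (by omega)).symm

theorem band1 (c : Int) : PySem.Int.band c 1 = c % 2 := by
  rw [PySem.Int.band_one]
  rw [PySem.Int.mod_eq_emod_of_pos (by norm_num)]

theorem inv_loop (l : List Int) : ∀ (acc bb c : Int),
    (List.foldl aBitStep (acc, bb, c) l).1 % 256
      = loopI l.length (acc % 256) (bb % 256) (c % ((2 : Int) ^ l.length)) := by
  induction l with
  | nil => intro acc bb c; simp [loopI]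
  | cons x l ih =>
    intro acc bb c
    rw [List.foldl_cons]
    show (List.foldl aBitStep (aBitStep (acc, bb, c) x) l).1 % 256 = _
    rw [show aBitStep (acc, bb, c) x
        = (if PySem.Int.band c 1 ≠ 0 then PySem.Int.bxor acc bb else acc, xtime bb, c >>> (1:Nat)) from rfl]
    rw [ih]
    simp only [List.length_cons]
    rw [show loopI (l.length + 1) (acc % 256) (bb % 256) (c % 2 ^ (l.length + 1))
        = loopI l.length
            (if (c % 2 ^ (l.length + 1)) % 2 = 1 then PySem.Int.bxor (acc % 256) (bb % 256) else acc % 256)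
            (xtI (bb % 256)) ((c % 2 ^ (l.length + 1)) / 2) from rfl]
    have hdvd : (2:Int) ∣ 2 ^ (l.length + 1) := dvd_pow_self 2 (Nat.succ_ne_zero l.length)
    have hbit : (c % 2 ^ (l.length + 1)) % 2 = c % 2 := Int.emod_emod_of_dvd c hdvd
    have hpow : (0:Int) < 2 ^ l.length := by positivity
    have hc' : (c >>> (1:Nat)) % 2 ^ l.length = (c % 2 ^ (l.length + 1)) / 2 := by
      rw [shiftr1, ← halfmod c (2 ^ l.length) hpow, ← pow_succ']
    have hbb : (xtime bb) % 256 = xtI (bb % 256) := by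
      rw [Int.emod_eq_of_lt (xtime_range bb).1 (xtime_range bb).2, xtime_eq]
    have hacc : (if PySem.Int.band c 1 ≠ 0 then PySem.Int.bxor acc bb else acc) % 256
        = (if (c % 2 ^ (l.length + 1)) % 2 = 1 then PySem.Int.bxor (acc % 256) (bb % 256) else acc % 256) := by
      rw [hbit, band1]
      by_cases hb : c % 2 = 1
      · rw [if_pos (by omega), if_pos hb, M1]
      · rw [if_neg (by omega), if_neg hb]
    rw [hacc, hbb, hc']

theorem loop_cast (fuel : Nat) : ∀ (a b c : Nat),
    loopI fuel (a : Int) (b : Int) (c : Int) = ((loopNN fuel a b c : Nat) : Int) := by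
  induction fuel with
  | zero => intro a b c; rfl
  | succ n ih =>
    intro a b c
    show loopI n _ _ _ = _
    rw [show loopNN (n+1) a b c
        = loopNN n (if c % 2 = 1 then a ^^^ b else a) (xtNN b) (c / 2) from rfl]
    have h1 : ((c:Int) % 2 = 1) ↔ (c % 2 = 1) := by omega
    have h2 : (if (c:Int) % 2 = 1 then PySem.Int.bxor (a:Int) (b:Int) else (a:Int))
        = (((if c % 2 = 1 then a ^^^ b else a : Nat)) : Int) := by
      by_cases hb : c % 2 = 1
      · rw [if_pos (h1.mpr hb), if_pos hb, PySem.Int.bxor_natCast]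
      · rw [if_neg (fun hc => hb (h1.mp hc)), if_neg hb]
    have h3 : ((c:Int) / 2) = ((c / 2 : Nat) : Int) := by omega
    rw [h2, xtI_cast, h3, ih]

theorem xtF_eq (b : Nat) (hb : b < 256) : xtNN b = xtF b := by
  unfold xtNN xtF
  by_cases h : 128 ≤ b
  · have hd : b / 128 = 1 := by omega
    rw [if_pos h, hd, Nat.mul_one, nxor_mod]
  · have hd : b / 128 = 0 := by omega
    rw [if_neg h, hd, Nat.mul_zero, Nat.xor_zero]
    omega

theorem xtF_lt (b : Nat) : xtF b < 256 := Nat.mod_lt _ (by norm_num)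

theorem sel (a b c : Nat) : (if c % 2 = 1 then a ^^^ b else a) = a ^^^ b * (c % 2) := by
  rcases Nat.mod_two_eq_zero_or_one c with h | h <;> simp [h]

theorem loop8F_eq (t c : Nat) (ht : t < 256) : loopNN 8 0 t c = loop8F t c := by
  simp only [loopNN, loop8F]
  rw [xtF_eq t ht, xtF_eq _ (xtF_lt t), xtF_eq _ (xtF_lt _), xtF_eq _ (xtF_lt _),
      xtF_eq _ (xtF_lt _), xtF_eq _ (xtF_lt _), xtF_eq _ (xtF_lt _)]
  simp only [sel]

set_option maxHeartbeats 16000000 in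
set_option maxRecDepth 100000 in
theorem chk : ((List.range 256).all fun c => (List.range 256).all fun t =>
    loop8F t c == gfF2 c t) = true := by decide

theorem gfF2_eq (c t : Nat) : gfF2 c t = gfFastN c t := by
  unfold gfF2 gfFastN zmask
  by_cases hc : c = 0
  · subst hc; simp
  · by_cases ht : t = 0
    · subst ht; simp
    · rw [if_neg (by tauto)]
      have h1 : 1 - (1 - c) = 1 := by omega
      have h2 : 1 - (1 - t) = 1 := by omega
      rw [h1, h2, Nat.mul_one, Nat.mul_one]

theorem coreN (c t : Nat) (hc : c < 256) (ht : t < 256) : loopNN 8 0 t c = gfFastN c t := by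
  have h := chk
  rw [List.all_eq_true] at h
  have h1 := h c (List.mem_range.mpr hc)
  rw [List.all_eq_true] at h1
  have h2 := h1 t (List.mem_range.mpr ht)
  rw [beq_iff_eq] at h2
  rw [loop8F_eq t c ht, h2, gfF2_eq]

set_option maxHeartbeats 16000000 in
set_option maxRecDepth 100000 in
theorem tables_eq : gfTables = (expLit, logLit) := by decide

set_option maxHeartbeats 16000000 in
set_option maxRecDepth 100000 in
theorem LPv : ∀ n : Nat, n < 256 → PySem.List.pyGetD logLit (n : Int) 0 = ((logAt n : Nat) : Int) := by decide
set_option maxHeartbeats 16000000 in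
set_option maxRecDepth 100000 in
theorem EPv : ∀ n : Nat, n < 255 → PySem.List.pyGetD expLit (n : Int) 0 = ((expAt n : Nat) : Int) := by decide
set_option maxHeartbeats 16000000 in
set_option maxRecDepth 100000 in
theorem factsN : ∀ t : Nat, t < 256 →
    t = gfFastN 1 t ∧ xtNN t = gfFastN 2 t ∧ (xtNN t ^^^ t) = gfFastN 3 t := by decide

theorem gf_mul_mod (c t : Int) : gf_mul c t = gf_mul (c % 256) (t % 256) := by
  simp only [gf_mul, M0]
  rw [Int.emod_emod_of_dvd c dvd_rfl, Int.emod_emod_of_dvd t dvd_rfl]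

theorem gf_mul_cast (c t : Nat) (hc : c < 256) (ht : t < 256) :
    gf_mul (c : Int) (t : Int) = ((gfFastN c t : Nat) : Int) := by
  simp only [gf_mul, gfFastN, M0, tables_eq]
  have hcc : ((c:Int)) % 256 = (c : Int) := Int.emod_eq_of_lt (by omega) (by omega)
  have htt : ((t:Int)) % 256 = (t : Int) := Int.emod_eq_of_lt (by omega) (by omega)
  rw [hcc, htt]
  by_cases h : c = 0 ∨ t = 0
  · have h' : (c:Int) = 0 ∨ (t:Int) = 0 := by rcases h with h | h <;> [left; right] <;> exact_mod_cast h
    rw [if_pos h', if_pos h]; rfl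
  · have h' : ¬ ((c:Int) = 0 ∨ (t:Int) = 0) := by
      push_neg at h ⊢
      exact ⟨by exact_mod_cast h.1, by exact_mod_cast h.2⟩
    rw [if_neg h', if_neg h]
    rw [LPv c hc, LPv t ht]
    rw [show ((logAt c : Nat) : Int) + ((logAt t : Nat) : Int) = ((logAt c + logAt t : Nat) : Int) by push_cast; ring]
    rw [show ((255:Int)) = ((255:Nat):Int) from rfl, PySem.Int.mod_natCast]
    rw [EPv _ (Nat.mod_lt _ (by norm_num))]

theorem entry (c t : Int) : contrib c t % 256 = gf_mul c t := by
  have hnt0 : 0 ≤ t % 256 := (emod256_lt t).1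
  have hnt1 : t % 256 < 256 := (emod256_lt t).2
  set nt : Nat := (t % 256).toNat with hntdef
  have hcast : t % 256 = ((nt : Nat) : Int) := by omega
  have hntlt : nt < 256 := by omega
  unfold contrib
  by_cases h1 : c = 1
  · subst h1
    rw [if_pos rfl, gf_mul_mod]
    have e1 : (1:Int) % 256 = ((1:Nat):Int) := by norm_num
    rw [e1, hcast, gf_mul_cast 1 nt (by norm_num) hntlt]
    have := (factsN nt hntlt).1
    omega
  · rw [if_neg h1]
    by_cases h2 : c = 2
    · subst h2
      rw [if_pos rfl, gf_mul_mod]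
      have e2 : (2:Int) % 256 = ((2:Nat):Int) := by norm_num
      rw [e2, hcast, gf_mul_cast 2 nt (by norm_num) hntlt]
      rw [Int.emod_eq_of_lt (xtime_range t).1 (xtime_range t).2, xtime_eq, hcast, xtI_cast]
      exact_mod_cast congrArg (fun n : Nat => ((n : Nat) : Int)) (factsN nt hntlt).2.1
    · rw [if_neg h2]
      by_cases h3 : c = 3
      · subst h3
        rw [if_pos rfl, gf_mul_mod]
        have e3 : (3:Int) % 256 = ((3:Nat):Int) := by norm_num
        rw [e3, hcast, gf_mul_cast 3 nt (by norm_num) hntlt]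
        rw [M1, Int.emod_eq_of_lt (xtime_range t).1 (xtime_range t).2, xtime_eq, hcast, xtI_cast,
            PySem.Int.bxor_natCast]
        exact_mod_cast congrArg (fun n : Nat => ((n : Nat) : Int)) (factsN nt hntlt).2.2
      · rw [if_neg h3, M0]
        rw [Int.emod_emod_of_dvd _ dvd_rfl]
        have hlen : (PySem.List.pyRange 0 8 1).length = 8 := by decide
        have hinv := inv_loop (PySem.List.pyRange 0 8 1) 0 t c
        rw [hlen] at hinv
        rw [hinv]
        have hz : (0:Int) % 256 = ((0:Nat):Int) := by norm_num
        have hnc0 : 0 ≤ c % 256 := (emod256_lt c).1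
        set nc : Nat := (c % 256).toNat with hncdef
        have hccast : c % ((2:Int) ^ (8:Nat)) = ((nc : Nat) : Int) := by
          rw [show ((2:Int) ^ (8:Nat)) = 256 by norm_num]; omega
        have hnclt : nc < 256 := by omega
        rw [hz, hcast, hccast, loop_cast, coreN nc nt hnclt hntlt, gf_mul_mod]
        rw [show c % 256 = ((nc:Nat):Int) by omega, hcast, gf_mul_cast nc nt hnclt hntlt]

theorem zero_bxor (a : Int) : PySem.Int.bxor 0 a = a := by
  rw [PySem.Int.bxor_comm, PySem.Int.bxor_zero]

theorem body_factor (v c t : Int) :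
    (if c = 1 then PySem.Int.bxor v t
     else if c = 2 then PySem.Int.bxor v (xtime t)
     else if c = 3 then PySem.Int.bxor v (PySem.Int.bxor (xtime t) t)
     else PySem.Int.bxor v (PySem.Int.band ((PySem.List.pyRange 0 8 1).foldl aBitStep (0, t, c)).1 255))
    = PySem.Int.bxor v (contrib c t) := by
  unfold contrib; split_ifs <;> rfl

theorem g0 {α : Type} (x0 x1 x2 x3 : α) (r : List α) (d : α) :
    PySem.List.pyGetD (x0 :: x1 :: x2 :: x3 :: r) 0 d = x0 := by
  rw [show (0:Int) = ((0:Nat):Int) from rfl, PySem.List.pyGetD_natCast]; rfl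
theorem g1 {α : Type} (x0 x1 x2 x3 : α) (r : List α) (d : α) :
    PySem.List.pyGetD (x0 :: x1 :: x2 :: x3 :: r) 1 d = x1 := by
  rw [show (1:Int) = ((1:Nat):Int) from rfl, PySem.List.pyGetD_natCast]; rfl
theorem g2 {α : Type} (x0 x1 x2 x3 : α) (r : List α) (d : α) :
    PySem.List.pyGetD (x0 :: x1 :: x2 :: x3 :: r) 2 d = x2 := by
  rw [show (2:Int) = ((2:Nat):Int) from rfl, PySem.List.pyGetD_natCast]; rfl
theorem g3 {α : Type} (x0 x1 x2 x3 : α) (r : List α) (d : α) :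
    PySem.List.pyGetD (x0 :: x1 :: x2 :: x3 :: r) 3 d = x3 := by
  rw [show (3:Int) = ((3:Nat):Int) from rfl, PySem.List.pyGetD_natCast]; rfl
theorem s0 (a b c d v : Int) : PySem.List.pySetD [a, b, c, d] 0 v = [v, b, c, d] := by
  rw [show (0:Int) = ((0:Nat):Int) from rfl, PySem.List.pySetD_natCast]; rfl
theorem s1 (a b c d v : Int) : PySem.List.pySetD [a, b, c, d] 1 v = [a, v, c, d] := by
  rw [show (1:Int) = ((1:Nat):Int) from rfl, PySem.List.pySetD_natCast]; rfl
theorem s2 (a b c d v : Int) : PySem.List.pySetD [a, b, c, d] 2 v = [a, b, v, d] := by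
  rw [show (2:Int) = ((2:Nat):Int) from rfl, PySem.List.pySetD_natCast]; rfl
theorem s3 (a b c d v : Int) : PySem.List.pySetD [a, b, c, d] 3 v = [a, b, c, v] := by
  rw [show (3:Int) = ((3:Nat):Int) from rfl, PySem.List.pySetD_natCast]; rfl

theorem hr4 : PySem.List.pyRange 0 4 1 = [0, 1, 2, 3] := by decide

theorem column_eq (t0 t1 t2 t3 : Int) (crest : List Int) (m : List (List Int))
    (c00 c01 c02 c03 c10 c11 c12 c13 c20 c21 c22 c23 c30 c31 c32 c33 : Int)
    (r0 r1 r2 r3 : List Int) (mrest : List (List Int))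
    (hm : m = (c00 :: c01 :: c02 :: c03 :: r0) :: (c10 :: c11 :: c12 :: c13 :: r1)
        :: (c20 :: c21 :: c22 :: c23 :: r2) :: (c30 :: c31 :: c32 :: c33 :: r3) :: mrest) :
    mix_single_column (t0 :: t1 :: t2 :: t3 :: crest) (some m)
      = mix_single_column_alt (t0 :: t1 :: t2 :: t3 :: crest) (some m) := by
  subst hm
  simp only [mix_single_column, mix_single_column_alt, hr4, List.foldl_cons, List.foldl_nil,
    List.map_cons, List.map_nil, g0, g1, g2, g3, body_factor, s0, s1, s2, s3]
  simp only [zero_bxor, M0, M1, entry]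

theorem column_eq_none (t0 t1 t2 t3 : Int) (crest : List Int) :
    mix_single_column (t0 :: t1 :: t2 :: t3 :: crest) none
      = mix_single_column_alt (t0 :: t1 :: t2 :: t3 :: crest) none := by
  simp only [mix_single_column, mix_single_column_alt, hr4, List.foldl_cons, List.foldl_nil,
    List.map_cons, List.map_nil, g0, g1, g2, g3, body_factor, s0, s1, s2, s3]
  simp only [zero_bxor, M0, M1, entry]

-- ===== VERDICT (by name: the statement is the Claim_ definition above) =====
theorem mix_single_column_spec : Claim_equal_mix_single_column := by
  intro col matrix hdom hpre
  obtain ⟨hcol, hmat⟩ := hpre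
  unfold Spec_mix_single_column
  rcases col with _ | ⟨t0, col⟩; · simp only [List.length_nil] at hcol; omega
  rcases col with _ | ⟨t1, col⟩; · simp only [List.length_cons, List.length_nil] at hcol; omega
  rcases col with _ | ⟨t2, col⟩; · simp only [List.length_cons, List.length_nil] at hcol; omega
  rcases col with _ | ⟨t3, crest⟩; · simp only [List.length_cons, List.length_nil] at hcol; omega
  cases matrix with
  | none => exact column_eq_none t0 t1 t2 t3 crest
  | some m =>
    obtain ⟨hlen, hrows⟩ := hmat m rfl
    rcases m with _ | ⟨r0, m⟩; · simp only [List.length_nil] at hlen; omega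
    rcases m with _ | ⟨r1, m⟩; · simp only [List.length_cons, List.length_nil] at hlen; omega
    rcases m with _ | ⟨r2, m⟩; · simp only [List.length_cons, List.length_nil] at hlen; omega
    rcases m with _ | ⟨r3, mrest⟩; · simp only [List.length_cons, List.length_nil] at hlen; omega
    have h0 := hrows r0 (by simp)
    have h1 := hrows r1 (by simp)
    have h2 := hrows r2 (by simp)
    have h3 := hrows r3 (by simp)
    rcases r0 with _ | ⟨c00, r0⟩; · simp only [List.length_nil] at h0; omega
    rcases r0 with _ | ⟨c01, r0⟩; · simp only [List.length_cons, List.length_nil] at h0; omega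
    rcases r0 with _ | ⟨c02, r0⟩; · simp only [List.length_cons, List.length_nil] at h0; omega
    rcases r0 with _ | ⟨c03, r0⟩; · simp only [List.length_cons, List.length_nil] at h0; omega
    rcases r1 with _ | ⟨c10, r1⟩; · simp only [List.length_nil] at h1; omega
    rcases r1 with _ | ⟨c11, r1⟩; · simp only [List.length_cons, List.length_nil] at h1; omega
    rcases r1 with _ | ⟨c12, r1⟩; · simp only [List.length_cons, List.length_nil] at h1; omega
    rcases r1 with _ | ⟨c13, r1⟩; · simp only [List.length_cons, List.length_nil] at h1; omega
    rcases r2 with _ | ⟨c20, r2⟩; · simp only [List.length_nil] at h2; omega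
    rcases r2 with _ | ⟨c21, r2⟩; · simp only [List.length_cons, List.length_nil] at h2; omega
    rcases r2 with _ | ⟨c22, r2⟩; · simp only [List.length_cons, List.length_nil] at h2; omega
    rcases r2 with _ | ⟨c23, r2⟩; · simp only [List.length_cons, List.length_nil] at h2; omega
    rcases r3 with _ | ⟨c30, r3⟩; · simp only [List.length_nil] at h3; omega
    rcases r3 with _ | ⟨c31, r3⟩; · simp only [List.length_cons, List.length_nil] at h3; omega
    rcases r3 with _ | ⟨c32, r3⟩; · simp only [List.length_cons, List.length_nil] at h3; omega
    rcases r3 with _ | ⟨c33, r3⟩; · simp only [List.length_cons, List.length_nil] at h3; omega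
    exact (column_eq t0 t1 t2 t3 crest _ c00 c01 c02 c03 c10 c11 c12 c13 c20 c21 c22 c23
      c30 c31 c32 c33 r0 r1 r2 r3 mrest rfl)
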